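-- pv_equiv track=rewrite | github.com/Zhibarie/Testpedia | bridge.py | _expand_brush
-- ===== SOURCE A (Python) =====
-- def _expand_brush(row, col, brush_size, h, w):
--     r = brush_size // 2
--     pts = []
--     for dr in range(-r, r+1):
--         for dc in range(-r, r+1):
--             nr, nc = row+dr, col+dc
--             if 0<=nr<h and 0<=nc<w: pts.append((nr,nc))
--     return pts
-- ===== SOURCE B (Python) =====
-- def _expand_brush(row, col, brush_size, h, w):
--     r = brush_size // 2
--     rlo, clo = max(0, row - r), max(0, col - r)
--     nrows = min(h - 1, row + r) - rlo + 1
--     ncols = min(w - 1, col + r) - clo + 1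
--     if nrows <= 0 or ncols <= 0:
--         return []
--     return [(rlo + k // ncols, clo + k % ncols) for k in range(nrows * ncols)]
-- ===== Notes on version B (the rewrite author's own statement) =====
-- stated objective: alternative
-- what changed: B replaces A's nested (2r+1)x(2r+1) offset scan with a per-point bounds test by a single flat loop over range(nrows*ncols) of the pre-clipped rectangle, decoding each flat index k into (row, col) via divmod (k // ncols, k % ncols).
import Mathlib
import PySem

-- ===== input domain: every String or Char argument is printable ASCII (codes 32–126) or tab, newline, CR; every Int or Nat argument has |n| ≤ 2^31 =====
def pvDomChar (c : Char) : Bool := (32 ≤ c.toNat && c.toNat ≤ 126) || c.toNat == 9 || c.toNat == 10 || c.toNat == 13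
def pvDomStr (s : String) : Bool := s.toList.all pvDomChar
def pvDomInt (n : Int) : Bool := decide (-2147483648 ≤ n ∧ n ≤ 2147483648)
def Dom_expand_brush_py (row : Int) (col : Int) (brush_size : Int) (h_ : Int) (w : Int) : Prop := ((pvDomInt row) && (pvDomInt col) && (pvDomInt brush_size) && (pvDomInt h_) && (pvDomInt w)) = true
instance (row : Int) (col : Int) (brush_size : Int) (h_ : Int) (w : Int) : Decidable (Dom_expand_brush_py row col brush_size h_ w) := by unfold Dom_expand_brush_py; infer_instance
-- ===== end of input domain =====

-- B clips the window once, then emits the clipped rectangle by a SINGLE flat loop over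
-- k in range(nrows*ncols), decoding each k into (row, col) by divmod — no nested loops,
-- no per-point bounds test (objective: alternative).

-- ===== PORT A =====
def expand_brush_py (row : Int) (col : Int) (brush_size : Int) (h_ : Int) (w : Int) : List (Int × Int) :=
  let r := PySem.Int.floordiv brush_size 2
  (PySem.List.pyRange (-r) (r + 1) 1).foldl (fun pts dr =>
    (PySem.List.pyRange (-r) (r + 1) 1).foldl (fun pts dc =>
      let nr := row + dr
      let nc := col + dc
      if 0 ≤ nr ∧ nr < h_ ∧ 0 ≤ nc ∧ nc < w then pts ++ [(nr, nc)] else pts) pts) []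

-- ===== PORT B =====
def expand_brush_py_alt (row : Int) (col : Int) (brush_size : Int) (h_ : Int) (w : Int) : List (Int × Int) :=
  let r := PySem.Int.floordiv brush_size 2
  let rlo := max 0 (row - r)
  let clo := max 0 (col - r)
  let nrows := min (h_ - 1) (row + r) - rlo + 1
  let ncols := min (w - 1) (col + r) - clo + 1
  if nrows ≤ 0 ∨ ncols ≤ 0 then []
  else (PySem.List.pyRange 0 (nrows * ncols) 1).map
    (fun k => (rlo + PySem.Int.floordiv k ncols, clo + PySem.Int.mod k ncols))

-- ===== PRECONDITION & SPEC =====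
def Spec_expand_brush_py (row : Int) (col : Int) (brush_size : Int) (h_ : Int) (w : Int) (out : List (Int × Int)) : Prop := out = expand_brush_py_alt row col brush_size h_ w
instance (row : Int) (col : Int) (brush_size : Int) (h_ : Int) (w : Int) (out : List (Int × Int)) : Decidable (Spec_expand_brush_py row col brush_size h_ w out) := by unfold Spec_expand_brush_py; infer_instance

-- ===== CLAIM (what is proved, stated in full; the proofs are below) =====
def Claim_equal_expand_brush_py : Prop := ∀ (row : Int) (col : Int) (brush_size : Int) (h_ : Int) (w : Int), Dom_expand_brush_py row col brush_size h_ w → Spec_expand_brush_py row col brush_size h_ w (expand_brush_py row col brush_size h_ w)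

-- ===== LEMMAS AND PROOFS =====

-- flatMap of an if-P-then-f-else-[] body is flatMap of f over the filtered list
theorem pv_flatMap_ite {α β : Type} (l : List α) (P : α → Prop) [DecidablePred P] (f : α → List β) :
    l.flatMap (fun x => if P x then f x else []) = (l.filter (fun x => decide (P x))).flatMap f := by
  induction l with
  | nil => simp
  | cons a t ih => by_cases h : P a <;> simp [h, ih]

-- filtering an integer range by a shifted interval and shifting = the clipped range
theorem pv_clip (lo hi c : Int) : ∀ (n : ℕ) (a b : Int), (b - a).toNat ≤ n →
    ((PySem.List.pyRange a b 1).filter (fun x => decide (lo ≤ c + x ∧ c + x < hi))).map (fun x => c + x)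
      = PySem.List.pyRange (max lo (c + a)) (min hi (c + b)) 1 := by
  intro n
  induction n with
  | zero =>
    intro a b hb
    rw [PySem.List.pyRange_one_eq_nil (by omega), PySem.List.pyRange_one_eq_nil (by omega)]
    simp
  | succ n ih =>
    intro a b hb
    by_cases hab : b ≤ a
    · rw [PySem.List.pyRange_one_eq_nil hab, PySem.List.pyRange_one_eq_nil (by omega)]
      simp
    · rw [PySem.List.pyRange_one_cons (by omega : a < b), List.filter_cons]
      by_cases hin : lo ≤ c + a ∧ c + a < hi
      · rw [decide_eq_true hin]
        simp only [if_pos, List.map_cons]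
        rw [ih (a + 1) b (by omega)]
        rw [show max lo (c + a) = c + a by omega]
        rw [PySem.List.pyRange_one_cons (by omega : c + a < min hi (c + b))]
        rw [show max lo (c + (a + 1)) = c + a + 1 by omega]
      · rw [decide_eq_false hin]
        simp only [Bool.false_eq_true, if_false]
        rw [ih (a + 1) b (by omega)]
        rcases (by omega : c + a < lo ∨ hi ≤ c + a) with hlt | hge
        · rw [show max lo (c + (a + 1)) = max lo (c + a) by omega]
        · rw [PySem.List.pyRange_one_eq_nil (by omega), PySem.List.pyRange_one_eq_nil (by omega)]

-- one row of A's scan: the filtered window row equals the clipped column range (or nothing)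
theorem pv_inner (row col h_ w r dr : Int) :
    ((PySem.List.pyRange (-r) (r + 1) 1).filter
        (fun dc => decide (0 ≤ row + dr ∧ row + dr < h_ ∧ 0 ≤ col + dc ∧ col + dc < w))).map
        (fun dc => (row + dr, col + dc))
      = if 0 ≤ row + dr ∧ row + dr < h_ then
          (PySem.List.pyRange (max 0 (col - r)) (min (w - 1) (col + r) + 1) 1).map
            (fun nc => (row + dr, nc))
        else [] := by
  by_cases hrow : 0 ≤ row + dr ∧ row + dr < h_
  · rw [if_pos hrow,
      List.filter_congr (fun dc _ => show _ = decide (0 ≤ col + dc ∧ col + dc < w) by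
        simp [hrow.1, hrow.2])]
    have hcomp :
        ((PySem.List.pyRange (-r) (r + 1) 1).filter (fun dc => decide (0 ≤ col + dc ∧ col + dc < w))).map
          (fun dc => (row + dr, col + dc))
        = (((PySem.List.pyRange (-r) (r + 1) 1).filter (fun dc => decide (0 ≤ col + dc ∧ col + dc < w))).map
            (fun dc => col + dc)).map (fun nc => (row + dr, nc)) := by
      rw [List.map_map]; rfl
    rw [hcomp, pv_clip 0 w col (r + 1 - -r).toNat (-r) (r + 1) le_rfl]
    rw [show max 0 (col + -r) = max 0 (col - r) by omega,
      show min w (col + (r + 1)) = min (w - 1) (col + r) + 1 by omega]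
  · rw [if_neg hrow]
    rw [List.filter_eq_nil_iff.mpr (fun dc _ => by
      simp only [decide_eq_true_eq]
      intro h
      exact hrow ⟨h.1, h.2.1⟩)]
    simp

-- A equals the clipped-rectangle row-major flatMap
theorem pv_A_rect (row col brush_size h_ w : Int) :
    expand_brush_py row col brush_size h_ w
      = (PySem.List.pyRange (max 0 (row - PySem.Int.floordiv brush_size 2))
            (min (h_ - 1) (row + PySem.Int.floordiv brush_size 2) + 1) 1).flatMap
          (fun nr => (PySem.List.pyRange (max 0 (col - PySem.Int.floordiv brush_size 2))
              (min (w - 1) (col + PySem.Int.floordiv brush_size 2) + 1) 1).map (fun nc => (nr, nc))) := by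
  unfold expand_brush_py
  simp only [PySem.List.foldl_append_ite, PySem.List.foldl_append_eq_flatMap, List.nil_append]
  set r := PySem.Int.floordiv brush_size 2 with hr
  rw [show (fun dr => ((PySem.List.pyRange (-r) (r + 1) 1).filter
        (fun dc => decide (0 ≤ row + dr ∧ row + dr < h_ ∧ 0 ≤ col + dc ∧ col + dc < w))).map
        (fun dc => (row + dr, col + dc)))
      = (fun dr => if 0 ≤ row + dr ∧ row + dr < h_ then
          (PySem.List.pyRange (max 0 (col - r)) (min (w - 1) (col + r) + 1) 1).map
            (fun nc => (row + dr, nc))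
        else []) from funext (fun dr => pv_inner row col h_ w r dr)]
  rw [pv_flatMap_ite]
  rw [← List.flatMap_map (fun dr => row + dr)
        (fun nr => (PySem.List.pyRange (max 0 (col - r)) (min (w - 1) (col + r) + 1) 1).map (fun nc => (nr, nc)))]
  rw [pv_clip 0 h_ row (r + 1 - -r).toNat (-r) (r + 1) le_rfl]
  rw [show max 0 (row + -r) = max 0 (row - r) by omega,
    show min h_ (row + (r + 1)) = min (h_ - 1) (row + r) + 1 by omega]

-- divmod decoding of a flat index range IS the row-major rectangle
theorem pv_decode (a b m : Int) (hm : 0 < m) : ∀ (n : ℕ),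
    (PySem.List.pyRange 0 ((n : Int) * m) 1).map
        (fun k => (a + PySem.Int.floordiv k m, b + PySem.Int.mod k m))
      = (PySem.List.pyRange a (a + (n : Int)) 1).flatMap
          (fun nr => (PySem.List.pyRange b (b + m) 1).map (fun nc => (nr, nc))) := by
  intro n
  induction n with
  | zero =>
    rw [show ((0:ℕ):Int) * m = 0 by simp, show a + ((0:ℕ):Int) = a by simp]
    rw [PySem.List.pyRange_one_eq_nil le_rfl, PySem.List.pyRange_one_eq_nil le_rfl]
    simp
  | succ n ih =>
    have hc : ((n + 1 : ℕ) : Int) = (n : Int) + 1 := by push_cast; ring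
    rw [hc]
    have hmul : ((n : Int) + 1) * m = (n : Int) * m + m := by ring
    rw [hmul]
    rw [PySem.List.pyRange_one_append 0 ((n : Int) * m) ((n : Int) * m + m)
        (by positivity) (by omega)]
    rw [List.map_append, ih]
    rw [show a + ((n : Int) + 1) = (a + (n : Int)) + 1 by ring]
    rw [PySem.List.pyRange_one_succ_right (by omega : a ≤ a + (n : Int))]
    rw [List.flatMap_append]
    congr 1
    rw [List.flatMap_singleton]
    -- last chunk: indices n*m … n*m+m-1 decode to row a+n, cols b … b+m-1
    rw [PySem.List.pyRange_one ((n : Int) * m) ((n : Int) * m + m),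
      PySem.List.pyRange_one b (b + m)]
    rw [List.map_map, List.map_map]
    rw [show ((n : Int) * m + m - (n : Int) * m) = m by ring,
      show (b + m - b) = m by ring]
    refine List.map_congr_left (fun j hj => ?_)
    have hjm : (j : Int) < m := by
      have := List.mem_range.mp hj
      omega
    have hj0 : (0 : Int) ≤ (j : Int) := by positivity
    have hfd : PySem.Int.floordiv ((n : Int) * m + (j : Int)) m = (n : Int) := by
      rw [PySem.Int.floordiv_eq_iff_of_pos hm]
      constructor
      · linarith
      · nlinarith
    have hmd : PySem.Int.mod ((n : Int) * m + (j : Int)) m = (j : Int) := by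
      have h := PySem.Int.floordiv_mul_add_mod ((n : Int) * m + (j : Int)) m
      rw [hfd] at h
      linarith
    simp only [Function.comp]
    rw [hfd, hmd]

theorem pv_main (row col brush_size h_ w : Int) :
    expand_brush_py row col brush_size h_ w = expand_brush_py_alt row col brush_size h_ w := by
  rw [pv_A_rect]
  unfold expand_brush_py_alt
  set r := PySem.Int.floordiv brush_size 2 with hr
  set rlo := max 0 (row - r) with hrlo
  set clo := max 0 (col - r) with hclo
  set nrows := min (h_ - 1) (row + r) - rlo + 1 with hnrows
  set ncols := min (w - 1) (col + r) - clo + 1 with hncols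
  have hRB : min (h_ - 1) (row + r) + 1 = rlo + nrows := by omega
  have hCB : min (w - 1) (col + r) + 1 = clo + ncols := by omega
  rw [hRB, hCB]
  by_cases hdeg : nrows ≤ 0 ∨ ncols ≤ 0
  · rw [if_pos hdeg]
    rcases hdeg with h1 | h2
    · rw [PySem.List.pyRange_one_eq_nil (by omega : rlo + nrows ≤ rlo)]
      simp
    · rw [show (PySem.List.pyRange clo (clo + ncols) 1) = [] from
        PySem.List.pyRange_one_eq_nil (by omega)]
      simp
  · rw [if_neg hdeg]
    have h2 : 0 < ncols := by omega
    have hn : ((nrows.toNat : ℕ) : Int) = nrows := Int.toNat_of_nonneg (by omega)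
    have hd := pv_decode rlo clo ncols h2 nrows.toNat
    rw [hn] at hd
    exact hd.symm

-- ===== VERDICT (by name: the statement is the Claim_ definition above) =====
theorem expand_brush_py_spec : Claim_equal_expand_brush_py := by
  intro row col brush_size h_ w _
  unfold Spec_expand_brush_py
  exact pv_main row col brush_size h_ w
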